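-- pv_equiv track=rewrite | github.com/edgecdec/SleeperLiveDraftRankings | Rankings/PopulateFromSites/FantasyProsSeleniumV3.py | calculate_tier_from_rank
-- ===== SOURCE A (Python) =====
-- def calculate_tier_from_rank(rank, position):
--     """Calculate tier based on overall rank and position"""
--     # Position-specific tier breaks (approximate)
--     tier_breaks = {
--         'QB': [12, 24, 36, 48],  # QB tiers are more spread out
--         'RB': [12, 24, 36, 48, 60],
--         'WR': [12, 24, 36, 48, 60, 72],
--         'TE': [6, 12, 18, 24, 30],
--         'K': [8, 16, 24],
--         'DST': [8, 16, 24]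
--     }
--
--     breaks = tier_breaks.get(position, [12, 24, 36, 48, 60])
--
--     for i, break_point in enumerate(breaks):
--         if rank <= break_point:
--             return i + 1
--
--     return len(breaks) + 1
-- ===== SOURCE B (Python) =====
-- def calculate_tier_from_rank(rank, position):
--     """Calculate tier based on overall rank and position (closed form, no scan)"""
--     step, num_tiers = {
--         'QB': (12, 5),
--         'RB': (12, 6),
--         'WR': (12, 7),
--         'TE': (6, 6),
--         'K': (8, 4),
--         'DST': (8, 4),
--     }.get(position, (12, 6))
--     return max(1, min(num_tiers, -(-rank // step)))
-- ===== Notes on version B (the rewrite author's own statement) =====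
-- stated objective: simpler
-- what changed: Replaced the linear scan over break-point lists by a closed form: each position maps to (step, num_tiers) and the tier is max(1, min(num_tiers, ceil(rank/step))).
import Mathlib
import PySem

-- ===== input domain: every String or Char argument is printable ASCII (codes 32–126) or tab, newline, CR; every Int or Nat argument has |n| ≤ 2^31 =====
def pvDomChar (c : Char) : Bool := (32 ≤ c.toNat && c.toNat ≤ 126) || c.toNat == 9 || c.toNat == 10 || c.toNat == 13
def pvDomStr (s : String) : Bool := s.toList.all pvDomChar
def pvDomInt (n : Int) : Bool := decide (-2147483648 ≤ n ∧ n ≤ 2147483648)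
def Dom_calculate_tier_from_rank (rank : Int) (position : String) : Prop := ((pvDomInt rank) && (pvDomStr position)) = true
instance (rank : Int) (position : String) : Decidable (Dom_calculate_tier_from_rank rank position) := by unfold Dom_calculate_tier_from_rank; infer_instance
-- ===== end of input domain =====

-- B replaces A's scan over break-point lists by a per-position (step, num_tiers) lookup and a
-- clamped ceiling division (objective: simpler).

-- ===== PORT A =====
-- the 'for i, break_point in enumerate(breaks): if rank <= break_point: return i + 1' loop,
-- followed by 'return len(breaks) + 1'; i is the running index
def tierScan (rank : Int) : List Int → Int → Int
  | [], i => i + 1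
  | b :: rest, i => if rank ≤ b then i + 1 else tierScan rank rest (i + 1)

def calculate_tier_from_rank (rank : Int) (position : String) : Int :=
  let tier_breaks : PySem.Dict String (List Int) := PySem.Dict.mk
    [("QB", [12, 24, 36, 48]),
     ("RB", [12, 24, 36, 48, 60]),
     ("WR", [12, 24, 36, 48, 60, 72]),
     ("TE", [6, 12, 18, 24, 30]),
     ("K", [8, 16, 24]),
     ("DST", [8, 16, 24])]
  let breaks := PySem.Dict.getD tier_breaks position [12, 24, 36, 48, 60]
  tierScan rank breaks 0

-- ===== PORT B =====
def calculate_tier_from_rank_alt (rank : Int) (position : String) : Int :=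
  let p : Int × Int := PySem.Dict.getD
    (PySem.Dict.mk
      [("QB", ((12 : Int), (5 : Int))),
       ("RB", (12, 6)),
       ("WR", (12, 7)),
       ("TE", (6, 6)),
       ("K", (8, 4)),
       ("DST", (8, 4))]) position (12, 6)
  -- 'max(1, min(num_tiers, -(-rank // step)))'
  max 1 (min p.2 (-(PySem.Int.floordiv (-rank) p.1)))

-- ===== PRECONDITION & SPEC =====
def Spec_calculate_tier_from_rank (rank : Int) (position : String) (out : Int) : Prop := out = calculate_tier_from_rank_alt rank position
instance (rank : Int) (position : String) (out : Int) : Decidable (Spec_calculate_tier_from_rank rank position out) := by unfold Spec_calculate_tier_from_rank; infer_instance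

-- ===== CLAIM (what is proved, stated in full; the proofs are below) =====
def Claim_equal_calculate_tier_from_rank : Prop := ∀ (rank : Int) (position : String), Dom_calculate_tier_from_rank rank position → Spec_calculate_tier_from_rank rank position (calculate_tier_from_rank rank position)

-- ===== LEMMAS AND PROOFS =====

-- ceiling-division bracket: q = ceil(rank / s) satisfies (q-1)·s < rank ≤ q·s
theorem tier_bracket (rank s : Int) (hs : 0 < s) :
    ((-(PySem.Int.floordiv (-rank) s)) - 1) * s < rank ∧ rank ≤ (-(PySem.Int.floordiv (-rank) s)) * s :=
  (PySem.Int.neg_floordiv_neg_eq_iff_of_pos hs).mp rfl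

-- ===== VERDICT (by name: the statement is the Claim_ definition above) =====
theorem calculate_tier_from_rank_spec : Claim_equal_calculate_tier_from_rank := by
  intro rank position _
  unfold Spec_calculate_tier_from_rank calculate_tier_from_rank calculate_tier_from_rank_alt
  by_cases h1 : position = "QB"
  · obtain ⟨h, h'⟩ := tier_bracket rank 12 (by omega)
    simp [h1, PySem.Dict.getD, PySem.Dict.get?_mk_cons, tierScan]; split_ifs <;> omega
  · by_cases h2 : position = "RB"
    · obtain ⟨h, h'⟩ := tier_bracket rank 12 (by omega)
      simp [h2, PySem.Dict.getD, PySem.Dict.get?_mk_cons, tierScan]; split_ifs <;> omega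
    · by_cases h3 : position = "WR"
      · obtain ⟨h, h'⟩ := tier_bracket rank 12 (by omega)
        simp [h3, PySem.Dict.getD, PySem.Dict.get?_mk_cons, tierScan]; split_ifs <;> omega
      · by_cases h4 : position = "TE"
        · obtain ⟨h, h'⟩ := tier_bracket rank 6 (by omega)
          simp [h4, PySem.Dict.getD, PySem.Dict.get?_mk_cons, tierScan]; split_ifs <;> omega
        · by_cases h5 : position = "K"
          · obtain ⟨h, h'⟩ := tier_bracket rank 8 (by omega)
            simp [h5, PySem.Dict.getD, PySem.Dict.get?_mk_cons, tierScan]; split_ifs <;> omega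
          · by_cases h6 : position = "DST"
            · obtain ⟨h, h'⟩ := tier_bracket rank 8 (by omega)
              simp [h6, PySem.Dict.getD, PySem.Dict.get?_mk_cons, tierScan]; split_ifs <;> omega
            · obtain ⟨h, h'⟩ := tier_bracket rank 12 (by omega)
              simp [PySem.Dict.getD, PySem.Dict.get?, PySem.Dict.get?_mk_cons, tierScan,
                    Ne.symm h1, Ne.symm h2, Ne.symm h3, Ne.symm h4, Ne.symm h5, Ne.symm h6]
              split_ifs <;> omega
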